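-- pv_equiv track=rewrite | github.com/Wilaroo/Trading-and-Analysis-Platform | backend/services/context_awareness_service.py | _get_time_until_next
-- ===== SOURCE A (Python) =====
-- def _get_time_until_next(current_minutes: int) -> str:
--     """Get time until next trading session"""
--     session_starts = {
--         4 * 60: "Pre-Market",
--         9 * 60 + 30: "Market Open",
--         10 * 60 + 30: "Morning Session",
--         12 * 60: "Midday",
--         14 * 60: "Afternoon",
--         15 * 60 + 30: "Market Close",
--         16 * 60: "After Hours"
--     }
--
--     for start_time, name in sorted(session_starts.items()):
--         if current_minutes < start_time:
--             mins_until = start_time - current_minutes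
--             hours = mins_until // 60
--             mins = mins_until % 60
--             if hours > 0:
--                 return f"{hours}h {mins}m until {name}"
--             return f"{mins}m until {name}"
--
--     return "Market close in progress"
-- ===== SOURCE B (Python) =====
-- _THRESHOLDS = [4 * 60, 9 * 60 + 30, 10 * 60 + 30, 12 * 60, 14 * 60, 15 * 60 + 30, 16 * 60]
-- _NAMES = ["Pre-Market", "Market Open", "Morning Session", "Midday",
--           "Afternoon", "Market Close", "After Hours"]
--
--
-- def _get_time_until_next(current_minutes: int) -> str:
--     """Get time until next trading session"""
--     # binary search for the first threshold strictly greater than current_minutes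
--     lo, hi = 0, len(_THRESHOLDS)
--     while lo < hi:
--         mid = (lo + hi) // 2
--         if _THRESHOLDS[mid] <= current_minutes:
--             lo = mid + 1
--         else:
--             hi = mid
--     if lo == len(_THRESHOLDS):
--         return "Market close in progress"
--     start_time = _THRESHOLDS[lo]
--     name = _NAMES[lo]
--     mins_until = start_time - current_minutes
--     hours, mins = divmod(mins_until, 60)
--     if hours > 0:
--         return f"{hours}h {mins}m until {name}"
--     return f"{mins}m until {name}"
-- ===== Notes on version B (the rewrite author's own statement) =====
-- stated objective: alternative
-- what changed: Replaces the linear scan over a sorted dict of session starts by a binary search (hand-written bisect_right) over two parallel constant lists of thresholds and names.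
import Mathlib
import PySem

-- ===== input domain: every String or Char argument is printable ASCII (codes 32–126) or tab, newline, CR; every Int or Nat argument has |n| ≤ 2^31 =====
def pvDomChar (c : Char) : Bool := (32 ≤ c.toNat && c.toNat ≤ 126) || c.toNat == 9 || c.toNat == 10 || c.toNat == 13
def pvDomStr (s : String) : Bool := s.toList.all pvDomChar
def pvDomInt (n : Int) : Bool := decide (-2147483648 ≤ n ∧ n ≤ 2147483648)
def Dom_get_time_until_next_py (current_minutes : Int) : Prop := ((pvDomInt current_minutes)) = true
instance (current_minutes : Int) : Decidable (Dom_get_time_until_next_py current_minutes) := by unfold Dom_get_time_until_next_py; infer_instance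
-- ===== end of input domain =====

-- B replaces A's linear scan over the sorted dict items by a hand-written binary
-- search over two parallel constant lists (thresholds / names): an alternative
-- data-structure/traversal of the same 7 breakpoints, return value identical.

-- ===== PORT A =====
-- the dict literal, in insertion order
def pvSessionStarts : PySem.Dict Int String :=
  ((((((PySem.Dict.empty.insert (4*60) "Pre-Market").insert (9*60+30) "Market Open").insert
      (10*60+30) "Morning Session").insert (12*60) "Midday").insert (14*60) "Afternoon").insert
      (15*60+30) "Market Close").insert (16*60) "After Hours"

-- the for-loop with its early returns
def pvLoopA (current_minutes : Int) : List (Int × String) → String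
  | [] => "Market close in progress"
  | (start_time, name) :: rest =>
    if current_minutes < start_time then
      let mins_until := start_time - current_minutes
      let hours := PySem.Int.floordiv mins_until 60
      let mins := PySem.Int.mod mins_until 60
      if hours > 0 then
        PySem.Int.toStr hours ++ "h " ++ PySem.Int.toStr mins ++ "m until " ++ name
      else
        PySem.Int.toStr mins ++ "m until " ++ name
    else pvLoopA current_minutes rest

def get_time_until_next_py (current_minutes : Int) : String :=
  pvLoopA current_minutes
    (PySem.List.sorted2 pvSessionStarts.items Prod.fst Prod.snd false)

-- ===== PORT B =====
def pvThresholds : List Int := [4*60, 9*60+30, 10*60+30, 12*60, 14*60, 15*60+30, 16*60]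
def pvNames : List String :=
  ["Pre-Market", "Market Open", "Morning Session", "Midday", "Afternoon", "Market Close", "After Hours"]

-- the while-loop of Source B's hand-written binary search (lo, hi are list indices)
def pvBisect (x : Int) (lo hi : Nat) : Nat :=
  if _h : lo < hi then
    let mid := (lo + hi) / 2
    if pvThresholds.getD mid 0 ≤ x then pvBisect x (mid + 1) hi
    else pvBisect x lo mid
  else lo
termination_by hi - lo
decreasing_by all_goals omega

def get_time_until_next_py_alt (current_minutes : Int) : String :=
  let lo := pvBisect current_minutes 0 pvThresholds.length
  if lo == pvThresholds.length then "Market close in progress"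
  else
    -- indices are in range here, so getD is exactly Python's xs[lo]
    let start_time := pvThresholds.getD lo 0
    let name := pvNames.getD lo ""
    let mins_until := start_time - current_minutes
    let hours := PySem.Int.floordiv mins_until 60
    let mins := PySem.Int.mod mins_until 60
    if hours > 0 then
      PySem.Int.toStr hours ++ "h " ++ PySem.Int.toStr mins ++ "m until " ++ name
    else
      PySem.Int.toStr mins ++ "m until " ++ name

-- ===== PRECONDITION & SPEC =====
def Spec_get_time_until_next_py (current_minutes : Int) (out : String) : Prop := out = get_time_until_next_py_alt current_minutes
instance (current_minutes : Int) (out : String) : Decidable (Spec_get_time_until_next_py current_minutes out) := by unfold Spec_get_time_until_next_py; infer_instance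

-- ===== CLAIM (what is proved, stated in full; the proofs are below) =====
def Claim_equal_get_time_until_next_py : Prop := ∀ (current_minutes : Int), Dom_get_time_until_next_py current_minutes → Spec_get_time_until_next_py current_minutes (get_time_until_next_py current_minutes)

-- ===== LEMMAS AND PROOFS =====

-- the sorted dict items as a literal list
theorem pvSorted_eval :
    PySem.List.sorted2 pvSessionStarts.items Prod.fst Prod.snd false =
      [(240, "Pre-Market"), (570, "Market Open"), (630, "Morning Session"), (720, "Midday"),
       (840, "Afternoon"), (930, "Market Close"), (960, "After Hours")] := by decide

-- ===== VERDICT (by name: the statement is the Claim_ definition above) =====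
set_option maxRecDepth 8192 in
set_option maxHeartbeats 1000000 in
theorem get_time_until_next_py_spec : Claim_equal_get_time_until_next_py := by
  intro cm _
  unfold Spec_get_time_until_next_py get_time_until_next_py get_time_until_next_py_alt
  rw [pvSorted_eval]
  have hlen : pvThresholds.length = 7 := by simp [pvThresholds]
  rw [hlen]
  rcases lt_or_ge cm 240 with h0 | h0
  · have e : pvBisect cm 0 7 = 0 := by
      simp [pvBisect, pvThresholds]; split_ifs <;> omega
    simp [pvLoopA, pvThresholds, pvNames, List.getD, e, h0]
  rcases lt_or_ge cm 570 with h1 | h1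
  · have e : pvBisect cm 0 7 = 1 := by
      simp [pvBisect, pvThresholds]; split_ifs <;> omega
    simp [pvLoopA, pvThresholds, pvNames, List.getD, e, h1, show ¬(cm < 240) from by omega]
  rcases lt_or_ge cm 630 with h2 | h2
  · have e : pvBisect cm 0 7 = 2 := by
      simp [pvBisect, pvThresholds]; split_ifs <;> omega
    simp [pvLoopA, pvThresholds, pvNames, List.getD, e, h2, show ¬(cm < 240) from by omega, show ¬(cm < 570) from by omega]
  rcases lt_or_ge cm 720 with h3 | h3
  · have e : pvBisect cm 0 7 = 3 := by
      simp [pvBisect, pvThresholds]; split_ifs <;> omega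
    simp [pvLoopA, pvThresholds, pvNames, List.getD, e, h3, show ¬(cm < 240) from by omega, show ¬(cm < 570) from by omega, show ¬(cm < 630) from by omega]
  rcases lt_or_ge cm 840 with h4 | h4
  · have e : pvBisect cm 0 7 = 4 := by
      simp [pvBisect, pvThresholds]; split_ifs <;> omega
    simp [pvLoopA, pvThresholds, pvNames, List.getD, e, h4, show ¬(cm < 240) from by omega, show ¬(cm < 570) from by omega, show ¬(cm < 630) from by omega, show ¬(cm < 720) from by omega]
  rcases lt_or_ge cm 930 with h5 | h5
  · have e : pvBisect cm 0 7 = 5 := by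
      simp [pvBisect, pvThresholds]; split_ifs <;> omega
    simp [pvLoopA, pvThresholds, pvNames, List.getD, e, h5, show ¬(cm < 240) from by omega, show ¬(cm < 570) from by omega, show ¬(cm < 630) from by omega, show ¬(cm < 720) from by omega, show ¬(cm < 840) from by omega]
  rcases lt_or_ge cm 960 with h6 | h6
  · have e : pvBisect cm 0 7 = 6 := by
      simp [pvBisect, pvThresholds]; split_ifs <;> omega
    simp [pvLoopA, pvThresholds, pvNames, List.getD, e, h6, show ¬(cm < 240) from by omega, show ¬(cm < 570) from by omega, show ¬(cm < 630) from by omega, show ¬(cm < 720) from by omega, show ¬(cm < 840) from by omega, show ¬(cm < 930) from by omega]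
  have e : pvBisect cm 0 7 = 7 := by
    simp [pvBisect, pvThresholds]; split_ifs <;> omega
  simp [pvLoopA, e, show ¬(cm < 240) from by omega, show ¬(cm < 570) from by omega, show ¬(cm < 630) from by omega, show ¬(cm < 720) from by omega, show ¬(cm < 840) from by omega, show ¬(cm < 930) from by omega, show ¬(cm < 960) from by omega]
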